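-- pv_equiv track=rewrite | github.com/deepakgourav/Mark3 | app.py | fix_hand
-- ===== SOURCE A (Python) =====
-- def fix_hand(hand_str):
--     valid_cards = {'A', '2', '3', '4', '5', '6', '7', '8', '9', '10', 'J', 'Q', 'K'}
--     hand_str = str(hand_str).replace('-', '').upper()
--     cards = []
--     i = 0
--     while i < len(hand_str):
--         if hand_str[i] == '1' and i + 1 < len(hand_str) and hand_str[i + 1] == '0':
--             cards.append('10')
--             i += 2
--         else:
--             cards.append(hand_str[i])
--             i += 1
--     return '-'.join(card for card in cards if card in valid_cards)
-- ===== SOURCE B (Python) =====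
-- def fix_hand(hand_str):
--     # staged split-based algorithm: split the normalized string on '10',
--     # filter each segment's characters, then reassemble with '10' tokens
--     # interleaved between segments (split is exactly the greedy
--     # left-to-right non-overlapping '10' tokenization).
--     valid = set('A23456789JQK')
--     s = str(hand_str).replace('-', '').upper()
--     segs = [[c for c in seg if c in valid] for seg in s.split('10')]
--     tokens = segs[0] + [t for seg in segs[1:] for t in ['10'] + seg]
--     return '-'.join(tokens)
-- ===== Notes on version B (the rewrite author's own statement) =====
-- stated objective: alternative
-- what changed: Replaced A's character-by-character lookahead while-loop by a staged library-split algorithm: split the normalized string on the two-character token, filter each segment's characters against the valid singles, and reassemble the token list with that token interleaved between segments.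
import Mathlib
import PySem

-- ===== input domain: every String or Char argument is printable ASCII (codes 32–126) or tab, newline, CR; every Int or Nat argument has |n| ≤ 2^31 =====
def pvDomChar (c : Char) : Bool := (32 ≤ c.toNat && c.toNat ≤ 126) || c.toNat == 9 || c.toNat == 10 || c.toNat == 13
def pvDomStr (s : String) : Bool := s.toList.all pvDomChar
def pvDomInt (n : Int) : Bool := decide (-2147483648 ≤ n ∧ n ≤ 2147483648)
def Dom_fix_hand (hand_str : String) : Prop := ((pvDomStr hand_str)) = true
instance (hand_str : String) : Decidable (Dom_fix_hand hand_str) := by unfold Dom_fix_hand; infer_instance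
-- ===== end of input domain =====

-- B replaces A's character-by-character lookahead while-loop by a staged algorithm:
-- split the normalized string on '10', filter each segment's characters, and
-- reassemble with '10' tokens interleaved between segments (objective: alternative).

-- ===== PORT A =====
-- the Python set literal {'A',…,'K'}; cards are modelled as List Char (Python strings)
def pvValidCards : PySem.Set (List Char) :=
  PySem.Set.ofList [['A'], ['2'], ['3'], ['4'], ['5'], ['6'], ['7'], ['8'], ['9'],
                    ['1','0'], ['J'], ['Q'], ['K']]

-- the while-loop: i advancing by 1 or 2 over hand_str becomes consuming 1 or 2 chars
def pvLoopA : List Char → List (List Char)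
  | [] => []
  | c :: rest =>
    if c = '1' ∧ rest.head? = some '0' then   -- hand_str[i]=='1' and i+1<len and hand_str[i+1]=='0'
      ['1', '0'] :: pvLoopA rest.tail
    else
      [c] :: pvLoopA rest
termination_by cs => cs.length
decreasing_by all_goals (simp [List.length_tail]; try omega)

def fix_hand (hand_str : String) : String :=
  -- hand_str = str(hand_str).replace('-', '').upper()
  let s := (PySem.Str.upper (PySem.Str.replace hand_str "-" "")).toList
  let cards := pvLoopA s
  -- '-'.join(card for card in cards if card in valid_cards)
  String.ofList (PySem.Chars.join ['-'] (cards.filter (fun card => PySem.Set.contains pvValidCards card)))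

-- ===== PORT B =====
-- the characters of the Python set literal set('A23456789JQK')
def pvSingles : List Char := ['A','2','3','4','5','6','7','8','9','J','Q','K']

-- hand port of Python s.split('10') for the fixed two-character separator:
-- exact (greedy left-to-right non-overlapping occurrences, empty pieces kept)
def pvSplit10 : List Char → List (List Char)
  | [] => [[]]
  | c :: rest =>
    if c = '1' ∧ rest.head? = some '0' then
      [] :: pvSplit10 rest.tail
    else
      match pvSplit10 rest with
      | s :: ss => (c :: s) :: ss
      | [] => [[c]]   -- unreachable: pvSplit10 never returns []
termination_by cs => cs.length
decreasing_by all_goals (simp [List.length_tail]; try omega)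

def fix_hand_alt (hand_str : String) : String :=
  let s := (PySem.Str.upper (PySem.Str.replace hand_str "-" "")).toList
  -- segs = [[c for c in seg if c in valid] for seg in s.split('10')]
  let segs := (pvSplit10 s).map (fun seg => (seg.filter (fun c => c ∈ pvSingles)).map (fun c => [c]))
  -- tokens = segs[0] + [t for seg in segs[1:] for t in ['10'] + seg]
  let tokens := segs.headD [] ++ (segs.drop 1).flatMap (fun seg => ['1','0'] :: seg)
  String.ofList (PySem.Chars.join ['-'] tokens)

-- ===== PRECONDITION & SPEC =====
def Spec_fix_hand (hand_str : String) (out : String) : Prop := out = fix_hand_alt hand_str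
instance (hand_str : String) (out : String) : Decidable (Spec_fix_hand hand_str out) := by unfold Spec_fix_hand; infer_instance

-- ===== CLAIM (what is proved, stated in full; the proofs are below) =====
def Claim_equal_fix_hand : Prop := ∀ (hand_str : String), Dom_fix_hand hand_str → Spec_fix_hand hand_str (fix_hand hand_str)

-- ===== LEMMAS AND PROOFS =====

-- B's token assembly, as a function of the segment list (proof helper)
def pvTokens (segs : List (List (List Char))) : List (List Char) :=
  segs.headD [] ++ (segs.drop 1).flatMap (fun seg => ['1','0'] :: seg)

def pvFSeg (seg : List Char) : List (List Char) :=
  (seg.filter (fun c => c ∈ pvSingles)).map (fun c => [c])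

-- a singleton card is in the valid set exactly when its character is a valid single
theorem pv_mem_single (c : Char) : ([c] ∈ pvValidCards) ↔ c ∈ pvSingles := by
  simp [pvValidCards, PySem.Set.ofList, PySem.Set.add, pvSingles, List.cons.injEq]

theorem pvSplit10_ne_nil (cs : List Char) : pvSplit10 cs ≠ [] := by
  induction cs using pvSplit10.induct with
  | case1 => simp [pvSplit10]
  | case2 c rest h ih => simp [pvSplit10, h]
  | case3 c rest h s ss hs ih => simp [pvSplit10, h, hs]
  | case4 c rest h hs ih => simp [pvSplit10, h, hs]

-- the core correspondence: A's filtered token stream equals B's reassembly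
theorem pv_loop_eq_tokens (cs : List Char) :
    (pvLoopA cs).filter (fun card => PySem.Set.contains pvValidCards card)
      = pvTokens ((pvSplit10 cs).map pvFSeg) := by
  induction cs using pvSplit10.induct with
  | case1 => simp [pvLoopA, pvSplit10, pvTokens, pvFSeg]
  | case2 c rest h ih =>
    obtain ⟨hc, hh⟩ := h
    subst hc
    rw [pvLoopA, if_pos ⟨rfl, hh⟩, pvSplit10, if_pos ⟨rfl, hh⟩]
    have hv : (['1','0'] : List Char) ∈ pvValidCards := by decide
    cases hs : pvSplit10 rest.tail with
    | nil => exact absurd hs (pvSplit10_ne_nil _)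
    | cons s ss =>
      rw [hs] at ih
      simp [pvTokens, pvFSeg] at ih
      simp [hv, ih, pvTokens, pvFSeg]
  | case3 c rest h s ss hs ih =>
    rw [pvLoopA, if_neg h, pvSplit10, if_neg h, hs]
    rw [hs] at ih
    simp [pvTokens, pvFSeg] at ih
    by_cases hm : c ∈ pvSingles
    · have hv : ([c] : List Char) ∈ pvValidCards := (pv_mem_single c).mpr hm
      simp [hv, hm, ih, pvTokens, pvFSeg]
    · have hv : ¬ ([c] : List Char) ∈ pvValidCards := fun hx => hm ((pv_mem_single c).mp hx)
      simp [hv, hm, ih, pvTokens, pvFSeg]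
  | case4 c rest h hs ih =>
    exact absurd hs (pvSplit10_ne_nil _)

-- ===== VERDICT (by name: the statement is the Claim_ definition above) =====
theorem fix_hand_spec : Claim_equal_fix_hand := by
  intro hand_str _
  simp only [Spec_fix_hand, fix_hand, fix_hand_alt, pv_loop_eq_tokens]
  rfl
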